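-- pv_equiv track=rewrite | github.com/nayuki/Project-Euler-solutions | python/p225.py | has_tribonacci_multiple
-- ===== SOURCE A (Python) =====
-- def has_tribonacci_multiple(i):
-- 	seen = set()
-- 	a, b, c = 1, 1, 1
-- 	while True:
-- 		if a % i == 0:
-- 			return True
-- 		key = (a, b, c)
-- 		if key in seen:
-- 			return False
-- 		seen.add(key)
-- 		a, b, c = b, c, (a + b + c) % i
-- ===== SOURCE B (Python) =====
-- def has_tribonacci_multiple(i):
--     # The step map f(a,b,c) = (b,c,(a+b+c)%i) is invertible modulo i, with
--     # inverse g(a,b,c) = ((c-a-b)%i, a, b); hence the orbit of the reduced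
--     # start triple (r,r,r) is one pure cycle.  B walks that same cycle
--     # BACKWARD with g, so it needs no `seen` set: on canonical triples the
--     # leading entry is the residue itself (test a == 0, no extra %), and the
--     # walk stops exactly when the start triple recurs.
--     r = 1 % i
--     a, b, c = r, r, r
--     while True:
--         if a == 0:
--             return True
--         a, b, c = (c - a - b) % i, a, b
--         if (a, b, c) == (r, r, r):
--             return False
-- ===== Notes on version B (the rewrite author's own statement) =====
-- stated objective: alternative
-- what changed: B replaces A's seen-set cycle detection by a walk of the SAME cycle in the opposite direction using the inverse recurrence (a,b,c) -> ((c-a-b)%i, a, b): the step map is invertible mod i, so the orbit of the reduced start triple is purely periodic, and B stops when the start triple recurs, testing the already-reduced leading residue against 0 directly, in O(1) space.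
-- outside the precondition, e.g. on has_tribonacci_multiple(0): A raises ZeroDivisionError, B raises ZeroDivisionError
import Mathlib
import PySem

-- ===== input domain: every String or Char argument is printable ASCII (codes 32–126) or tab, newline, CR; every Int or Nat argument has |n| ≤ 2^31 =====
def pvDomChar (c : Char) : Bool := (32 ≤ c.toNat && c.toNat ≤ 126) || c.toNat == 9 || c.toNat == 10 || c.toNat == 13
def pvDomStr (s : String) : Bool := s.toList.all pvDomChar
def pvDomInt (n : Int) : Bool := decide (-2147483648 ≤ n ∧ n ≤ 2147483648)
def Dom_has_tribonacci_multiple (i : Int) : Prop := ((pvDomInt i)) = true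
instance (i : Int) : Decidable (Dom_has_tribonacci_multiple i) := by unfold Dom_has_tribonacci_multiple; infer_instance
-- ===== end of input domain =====

-- B drops A's `seen` set: the step map is invertible mod i, so the orbit is one pure cycle;
-- B walks that cycle backward with the inverse recurrence in O(1) space, stopping at the start.


-- ===== PORT A =====
-- literal transliteration of A's while-loop over (seen, a, b, c); the Nat argument is fuel,
-- a totality device only (proved never to run out under Pre_)
def loopA (i : Int) : Nat → Std.HashSet (Int × Int × Int) → Int → Int → Int → Bool
  | 0, _, _, _, _ => false
  | n + 1, seen, a, b, c =>
    if PySem.Int.mod a i = 0 then true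
    else if seen.contains (a, b, c) then false
    else loopA i n (seen.insert (a, b, c)) b c (PySem.Int.mod (a + b + c) i)

def has_tribonacci_multiple (i : Int) : Bool :=
  loopA i (i.natAbs ^ 3 + 4) ∅ 1 1 1

-- ===== PORT B =====
-- literal transliteration of Source B's backward do-while: test the leading residue, apply the
-- inverse step ((c-a-b)%i, a, b), stop on return to the start triple; fuel only for totality
def loopB (i r : Int) : Nat → Int → Int → Int → Bool
  | 0, _, _, _ => false
  | n + 1, a, b, c =>
    if a = 0 then true
    else if (PySem.Int.mod (c - a - b) i, a, b) = (r, r, r) then false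
    else loopB i r n (PySem.Int.mod (c - a - b) i) a b

def has_tribonacci_multiple_alt (i : Int) : Bool :=
  let r := PySem.Int.mod 1 i
  loopB i r (i.natAbs ^ 3 + 4) r r r

-- ===== PRECONDITION & SPEC =====
-- Pre_ excludes only i = 0, where Python A raises ZeroDivisionError (B raises there too).
def Pre_has_tribonacci_multiple (i : Int) : Prop := i ≠ 0
instance (i : Int) : Decidable (Pre_has_tribonacci_multiple i) := by
  unfold Pre_has_tribonacci_multiple; infer_instance

def pvWitness_has_tribonacci_multiple : Int := 2

def Spec_has_tribonacci_multiple (i : Int) (out : Bool) : Prop := out = has_tribonacci_multiple_alt i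
instance (i : Int) (out : Bool) : Decidable (Spec_has_tribonacci_multiple i out) := by unfold Spec_has_tribonacci_multiple; infer_instance

-- ===== CLAIM (what is proved, stated in full; the proofs are below) =====
def Claim_equal_has_tribonacci_multiple : Prop := ∀ (i : Int), Dom_has_tribonacci_multiple i → Pre_has_tribonacci_multiple i → Spec_has_tribonacci_multiple i (has_tribonacci_multiple i)

-- ===== LEMMAS AND PROOFS =====

-- the common one-step state map and its orbit
def tstep (i : Int) (s : Int × Int × Int) : Int × Int × Int :=
  (s.2.1, s.2.2, PySem.Int.mod (s.1 + s.2.1 + s.2.2) i)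

def torb (i : Int) (s : Int × Int × Int) : Nat → Int × Int × Int
  | 0 => s
  | k + 1 => tstep i (torb i s k)

-- the canonical-representative range of `x % i` (sign of the divisor)
def tInR (i x : Int) : Prop := (0 < i ∧ 0 ≤ x ∧ x < i) ∨ (i < 0 ∧ i < x ∧ x ≤ 0)

def tCan (i : Int) (s : Int × Int × Int) : Prop := tInR i s.1 ∧ tInR i s.2.1 ∧ tInR i s.2.2

def tCong (i : Int) (s t : Int × Int × Int) : Prop :=
  i ∣ s.1 - t.1 ∧ i ∣ s.2.1 - t.2.1 ∧ i ∣ s.2.2 - t.2.2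

-- A's orbit (from (1,1,1)) and B's orbit (from the reduced start triple)
def tV (i : Int) (k : Nat) : Int × Int × Int := torb i (1, 1, 1) k
def tU (i : Int) (k : Nat) : Int × Int × Int :=
  torb i (PySem.Int.mod 1 i, PySem.Int.mod 1 i, PySem.Int.mod 1 i) k

-- "the k-th state of the canonical orbit carries a multiple of i"
def tZ (i : Int) (k : Nat) : Prop := (tU i k).1 = 0

theorem mod_InR (i a : Int) (hi : i ≠ 0) : tInR i (PySem.Int.mod a i) := by
  rcases lt_or_gt_of_ne hi with h | h
  · exact Or.inr ⟨h, (PySem.Int.mod_neg_bounds a h).1, (PySem.Int.mod_neg_bounds a h).2⟩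
  · exact Or.inl ⟨h, PySem.Int.mod_nonneg a h, PySem.Int.mod_lt a h⟩

theorem dvd_sub_mod (a i : Int) : i ∣ a - PySem.Int.mod a i := by
  refine ⟨a.fdiv i, ?_⟩
  have h := Int.fmod_add_fdiv a i
  show a - a.fmod i = i * a.fdiv i
  linarith

theorem tInR_eq (i x y : Int) (hx : tInR i x) (hy : tInR i y) (h : i ∣ x - y) : x = y := by
  have h0 : x - y = 0 := by
    refine Int.eq_zero_of_dvd_of_natAbs_lt_natAbs h ?_
    unfold tInR at hx hy; omega
  omega

theorem mod_congr (i a b : Int) (hi : i ≠ 0) (h : i ∣ a - b) :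
    PySem.Int.mod a i = PySem.Int.mod b i := by
  refine tInR_eq i _ _ (mod_InR i a hi) (mod_InR i b hi) ?_
  have h1 := dvd_sub_mod a i
  have h2 := dvd_sub_mod b i
  have e : PySem.Int.mod a i - PySem.Int.mod b i
      = ((a - b) - (a - PySem.Int.mod a i)) + (b - PySem.Int.mod b i) := by ring
  rw [e]
  exact (h.sub h1).add h2

theorem mod_self_of_InR (i x : Int) (hi : i ≠ 0) (hx : tInR i x) : PySem.Int.mod x i = x :=
  tInR_eq i _ _ (mod_InR i x hi) hx (by
    have h := (dvd_neg (α := Int)).mpr (dvd_sub_mod x i)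
    rwa [neg_sub] at h)

theorem dvd_of_mod_eq (i a b : Int) (h : PySem.Int.mod a i = PySem.Int.mod b i) : i ∣ a - b := by
  have h1 := dvd_sub_mod a i
  have h2 := dvd_sub_mod b i
  have e : a - b = (a - PySem.Int.mod a i) - (b - PySem.Int.mod b i)
      + (PySem.Int.mod a i - PySem.Int.mod b i) := by ring
  have h3 : PySem.Int.mod a i - PySem.Int.mod b i = 0 := by rw [h, sub_self]
  rw [e, h3, add_zero]
  exact h1.sub h2

theorem torb_add (i : Int) (s : Int × Int × Int) (k : Nat) :
    ∀ t, torb i s (k + t) = torb i (torb i s k) t := by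
  intro t
  induction t with
  | zero => rfl
  | succ t ih => show tstep i (torb i s (k + t)) = _ ; rw [ih]; rfl

theorem torb_shift (i : Int) (s : Int × Int × Int) (a b : Nat)
    (h : torb i s a = torb i s b) : ∀ t, torb i s (a + t) = torb i s (b + t) := by
  intro t; rw [torb_add, torb_add, h]

theorem tstep_cong (i : Int) (s t : Int × Int × Int) (hi : i ≠ 0) (h : tCong i s t) :
    tCong i (tstep i s) (tstep i t) := by
  obtain ⟨h1, h2, h3⟩ := h
  refine ⟨h2, h3, ?_⟩
  have hm : PySem.Int.mod (s.1 + s.2.1 + s.2.2) i = PySem.Int.mod (t.1 + t.2.1 + t.2.2) i := by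
    refine mod_congr i _ _ hi ?_
    have e : s.1 + s.2.1 + s.2.2 - (t.1 + t.2.1 + t.2.2)
        = (s.1 - t.1) + (s.2.1 - t.2.1) + (s.2.2 - t.2.2) := by ring
    rw [e]; exact (h1.add h2).add h3
  show i ∣ PySem.Int.mod (s.1 + s.2.1 + s.2.2) i - PySem.Int.mod (t.1 + t.2.1 + t.2.2) i
  rw [hm, sub_self]
  exact dvd_zero i

theorem torb_cong (i : Int) (s t : Int × Int × Int) (hi : i ≠ 0) (h : tCong i s t) :
    ∀ k, tCong i (torb i s k) (torb i t k) := by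
  intro k
  induction k with
  | zero => exact h
  | succ k ih => exact tstep_cong i _ _ hi ih

theorem tstep_can (i : Int) (s : Int × Int × Int) (hi : i ≠ 0) (h : tCan i s) :
    tCan i (tstep i s) :=
  ⟨h.2.1, h.2.2, mod_InR i _ hi⟩

theorem tCan_U (i : Int) (hi : i ≠ 0) : ∀ k, tCan i (tU i k) := by
  intro k
  induction k with
  | zero => exact ⟨mod_InR i 1 hi, mod_InR i 1 hi, mod_InR i 1 hi⟩
  | succ k ih => exact tstep_can i _ hi ih

theorem tCong_VU (i : Int) (hi : i ≠ 0) : ∀ k, tCong i (tV i k) (tU i k) := by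
  intro k
  refine torb_cong i _ _ hi ⟨?_, ?_, ?_⟩ k <;> exact dvd_sub_mod 1 i

theorem tCong_can_eq (i : Int) (s t : Int × Int × Int) (hs : tCan i s) (ht : tCan i t)
    (h : tCong i s t) : s = t := by
  obtain ⟨s1, s2, s3⟩ := s
  obtain ⟨t1, t2, t3⟩ := t
  obtain ⟨c1, c2, c3⟩ := h
  have e1 := tInR_eq i s1 t1 hs.1 ht.1 c1
  have e2 := tInR_eq i s2 t2 hs.2.1 ht.2.1 c2
  have e3 := tInR_eq i s3 t3 hs.2.2 ht.2.2 c3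
  simp_all

theorem tstep_inj (i : Int) (s t : Int × Int × Int) (hi : i ≠ 0) (hs : tCan i s) (ht : tCan i t)
    (h : tstep i s = tstep i t) : s = t := by
  obtain ⟨s1, s2, s3⟩ := s
  obtain ⟨t1, t2, t3⟩ := t
  unfold tstep at h
  simp only [Prod.mk.injEq] at h
  obtain ⟨e2, e3, em⟩ := h
  subst e2; subst e3
  have hd : i ∣ s1 - t1 := by
    have hh := dvd_of_mod_eq i _ _ em
    have e : s1 + s2 + s3 - (t1 + s2 + s3) = s1 - t1 := by ring
    rwa [e] at hh
  have := tInR_eq i s1 t1 hs.1 ht.1 hd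
  simp_all

theorem tU_cancel (i : Int) (hi : i ≠ 0) (a b : Nat) (h : tU i (a + 1) = tU i (b + 1)) :
    tU i a = tU i b :=
  tstep_inj i _ _ hi (tCan_U i hi a) (tCan_U i hi b) h

theorem tU_sub (i : Int) (hi : i ≠ 0) : ∀ a d, tU i a = tU i (a + d) → tU i 0 = tU i d := by
  intro a
  induction a with
  | zero => intro d h; simpa using h
  | succ a ih =>
    intro d h
    refine ih d (tU_cancel i hi a (a + d) ?_)
    have e : a + 1 + d = a + d + 1 := by omega
    rwa [e] at h

theorem tFin_mem (i x : Int) (h : tInR i x) :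
    x ∈ (Finset.Ico 0 i ∪ Finset.Ioc i 0 : Finset Int) := by
  simp only [Finset.mem_union, Finset.mem_Ico, Finset.mem_Ioc]
  unfold tInR at h; omega

theorem tFin_card (i : Int) : (Finset.Ico 0 i ∪ Finset.Ioc i 0 : Finset Int).card = i.natAbs := by
  rcases (show 0 < i ∨ i ≤ 0 by omega) with h | h
  · rw [Finset.Ioc_eq_empty (by omega), Finset.union_empty, Int.card_Ico]
    omega
  · rw [Finset.Ico_eq_empty (by omega), Finset.empty_union, Int.card_Ioc]
    omega

theorem exists_period (i : Int) (hi : i ≠ 0) :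
    ∃ p, 1 ≤ p ∧ p ≤ i.natAbs ^ 3 ∧ tU i p = tU i 0 := by
  set F : Finset Int := Finset.Ico 0 i ∪ Finset.Ioc i 0 with hF
  have hmaps : ∀ k ∈ Finset.range (i.natAbs ^ 3 + 1), tU i k ∈ F ×ˢ F ×ˢ F := by
    intro k _
    obtain ⟨c1, c2, c3⟩ := tCan_U i hi k
    simp only [Finset.mem_product]
    exact ⟨tFin_mem i _ c1, tFin_mem i _ c2, tFin_mem i _ c3⟩
  have hcard : (F ×ˢ F ×ˢ F).card < (Finset.range (i.natAbs ^ 3 + 1)).card := by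
    simp only [Finset.card_product, Finset.card_range, hF, tFin_card]
    ring_nf
    omega
  obtain ⟨x, hx, y, hy, hxy, hexy⟩ :=
    Finset.exists_ne_map_eq_of_card_lt_of_maps_to hcard hmaps
  simp only [Finset.mem_range] at hx hy
  rcases Nat.lt_or_ge x y with hlt | hge
  · refine ⟨y - x, by omega, by omega, ?_⟩
    exact (tU_sub i hi x (y - x) (by rw [hexy]; congr 1; omega)).symm
  · have hlt : y < x := by omega
    refine ⟨x - y, by omega, by omega, ?_⟩
    exact (tU_sub i hi y (x - y) (by rw [← hexy]; congr 1; omega)).symm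

theorem tU_periodic (i : Int) (p : Nat) (hper : tU i p = tU i 0) :
    ∀ t, tU i (p + t) = tU i t := by
  intro t
  have h := torb_shift i (PySem.Int.mod 1 i, PySem.Int.mod 1 i, PySem.Int.mod 1 i) p 0 hper t
  simpa using h

theorem tU_reduce (i : Int) (p : Nat) (hp : 1 ≤ p) (hper : tU i p = tU i 0) :
    ∀ k, tU i k = tU i (k % p) := by
  intro k
  induction k using Nat.strong_induction_on with
  | _ k ih =>
    rcases Nat.lt_or_ge k p with h | h
    · rw [Nat.mod_eq_of_lt h]
    · have h1 : tU i k = tU i (k - p) := by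
        have h2 := tU_periodic i p hper (k - p)
        rw [show p + (k - p) = k by omega] at h2
        exact h2
      rw [h1, ih (k - p) (by omega), Nat.mod_eq_sub_mod h]

theorem test_U (i : Int) (hi : i ≠ 0) (k : Nat) :
    PySem.Int.mod (tU i k).1 i = 0 ↔ tZ i k := by
  rw [mod_self_of_InR i _ hi (tCan_U i hi k).1]
  exact Iff.rfl

theorem test_V (i : Int) (hi : i ≠ 0) (k : Nat) :
    PySem.Int.mod (tV i k).1 i = 0 ↔ tZ i k := by
  rw [mod_congr i _ _ hi (tCong_VU i hi k).1]
  exact test_U i hi k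

-- a repeat below a minimal zero index yields an earlier zero: contradiction
theorem tZ_earlier_V (i : Int) (hi : i ≠ 0) (k d l : Nat) (hk : tZ i k)
    (hmin : ∀ t < k, ¬ tZ i t) (hld : l < d) (hdk : d ≤ k) (hrep : tV i l = tV i d) : False := by
  have hs := torb_shift i (1, 1, 1) l d hrep (k - d)
  have e : d + (k - d) = k := by omega
  rw [e] at hs
  have hz' : PySem.Int.mod (tV i (l + (k - d))).1 i = 0 := by
    show PySem.Int.mod (torb i (1,1,1) (l + (k - d))).1 i = 0
    rw [hs]
    exact (test_V i hi k).mpr hk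
  exact hmin (l + (k - d)) (by omega) ((test_V i hi _).mp hz')

-- the seen-set invariant is preserved by adding the current state
theorem tSeen_add (i : Int) (d : Nat) (seen : Std.HashSet (Int × Int × Int))
    (hseen : ∀ x, seen.contains x = true ↔ ∃ l < d, tV i l = x) :
    ∀ x, (seen.insert (tV i d)).contains x = true ↔ ∃ l < d + 1, tV i l = x := by
  intro x
  rw [Std.HashSet.contains_iff_mem, Std.HashSet.mem_insert, beq_iff_eq]
  constructor
  · rintro (hx | hx)
    · exact ⟨d, by omega, hx⟩
    · obtain ⟨l, hl, hvl⟩ := (hseen x).mp (by rwa [Std.HashSet.contains_iff_mem])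
      exact ⟨l, by omega, hvl⟩
  · rintro ⟨l, hl, hvl⟩
    rcases Nat.lt_or_ge l d with h | h
    · exact Or.inr (by rw [← Std.HashSet.contains_iff_mem]; exact (hseen x).mpr ⟨l, h, hvl⟩)
    · exact Or.inl (by rw [show l = d by omega] at hvl; exact hvl)

-- ----- loop A returns true when a multiple exists -----
theorem loopA_true (i : Int) (hi : i ≠ 0) (k : Nat) (hk : tZ i k) (hmin : ∀ t < k, ¬ tZ i t) :
    ∀ n, ∀ d, ∀ seen : Std.HashSet (Int × Int × Int), d ≤ k → k - d < n →
      (∀ x, seen.contains x = true ↔ ∃ l < d, tV i l = x) →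
      loopA i n seen (tV i d).1 (tV i d).2.1 (tV i d).2.2 = true := by
  intro n
  induction n with
  | zero => intro d seen _ h _; omega
  | succ n ih =>
    intro d seen hdk hfuel hseen
    simp only [loopA]
    by_cases hz : PySem.Int.mod (tV i d).1 i = 0
    · rw [if_pos hz]
    · rw [if_neg hz]
      have hdk' : d < k := by
        rcases Nat.lt_or_ge d k with h | h
        · exact h
        · exact absurd ((test_V i hi k).mpr hk) (by rw [show k = d by omega] at hk ⊢; exact hz)
      by_cases hc : seen.contains ((tV i d).1, (tV i d).2.1, (tV i d).2.2) = true
      · exfalso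
        obtain ⟨l, hl, hvl⟩ := (hseen _).mp hc
        exact tZ_earlier_V i hi k d l hk hmin hl (by omega) hvl
      · rw [if_neg (by simpa using hc)]
        show loopA i n (seen.insert ((tV i d).1, (tV i d).2.1, (tV i d).2.2))
          (tV i (d + 1)).1 (tV i (d + 1)).2.1 (tV i (d + 1)).2.2 = true
        exact ih (d + 1) _ (by omega) (by omega) (tSeen_add i d seen hseen)

-- ----- loop A returns false when no multiple exists -----
theorem tVU_eq3 (i : Int) (hi : i ≠ 0) (k : Nat) : tV i (3 + k) = tU i (3 + k) := by
  refine tCong_can_eq i _ _ ?_ (tCan_U i hi _) (tCong_VU i hi _)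
  induction k with
  | zero =>
    show tCan i (tstep i (tstep i (tstep i (1, 1, 1))))
    exact ⟨mod_InR i _ hi, mod_InR i _ hi, mod_InR i _ hi⟩
  | succ k ih => exact tstep_can i _ hi ih

theorem loopA_false (i : Int) (hi : i ≠ 0) (p : Nat) (hp1 : 1 ≤ p) (hper : tU i p = tU i 0)
    (hnoz : ∀ t, ¬ tZ i t) :
    ∀ n, ∀ d, ∀ seen : Std.HashSet (Int × Int × Int), d ≤ 3 + p → 3 + p - d < n →
      (∀ x, seen.contains x = true ↔ ∃ l < d, tV i l = x) →
      loopA i n seen (tV i d).1 (tV i d).2.1 (tV i d).2.2 = false := by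
  intro n
  induction n with
  | zero => intro d seen _ h _; omega
  | succ n ih =>
    intro d seen hdp hfuel hseen
    simp only [loopA]
    rw [if_neg (fun hz => hnoz d ((test_V i hi d).mp hz))]
    by_cases hc : seen.contains ((tV i d).1, (tV i d).2.1, (tV i d).2.2) = true
    · rw [if_pos hc]
    · have hV3 : tV i (3 + p) = tV i 3 := by
        have h1 := tVU_eq3 i hi p
        have h2 : tU i (3 + p) = tU i 3 := by
          rw [show 3 + p = p + 3 by omega]
          exact tU_periodic i p hper 3
        have h3 := tVU_eq3 i hi 0
        rw [h1, h2, ← h3]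
      have hdlt : d < 3 + p := by
        rcases Nat.lt_or_ge d (3 + p) with h | h
        · exact h
        · exfalso
          apply hc
          refine (hseen _).mpr ⟨3, by omega, ?_⟩
          show tV i 3 = tV i d
          rw [show d = 3 + p by omega, hV3]
      rw [if_neg (by simpa using hc)]
      show loopA i n (seen.insert ((tV i d).1, (tV i d).2.1, (tV i d).2.2))
        (tV i (d + 1)).1 (tV i (d + 1)).2.1 (tV i (d + 1)).2.2 = false
      exact ih (d + 1) _ (by omega) (by omega) (tSeen_add i d seen hseen)

theorem tSeen_empty (i : Int) :
    ∀ x : Int × Int × Int, (∅ : Std.HashSet (Int × Int × Int)).contains x = true ↔ ∃ l < 0, tV i l = x := by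
  intro x
  rw [Std.HashSet.contains_iff_mem]
  constructor
  · intro h
    exact absurd h (Std.HashSet.not_mem_empty)
  · rintro ⟨l, hl, _⟩
    omega

-- ----- the inverse step walks the canonical orbit backward -----
theorem tU_back (i : Int) (hi : i ≠ 0) (m : Nat) :
    (PySem.Int.mod ((tU i (m + 1)).2.2 - (tU i (m + 1)).1 - (tU i (m + 1)).2.1) i,
      (tU i (m + 1)).1, (tU i (m + 1)).2.1) = tU i m := by
  have hcan := tCan_U i hi m
  have hS : PySem.Int.mod (PySem.Int.mod ((tU i m).1 + (tU i m).2.1 + (tU i m).2.2) i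
      - (tU i m).2.1 - (tU i m).2.2) i = (tU i m).1 := by
    have hd : i ∣ (PySem.Int.mod ((tU i m).1 + (tU i m).2.1 + (tU i m).2.2) i
        - (tU i m).2.1 - (tU i m).2.2) - (tU i m).1 := by
      have h1 := dvd_sub_mod ((tU i m).1 + (tU i m).2.1 + (tU i m).2.2) i
      have e : (PySem.Int.mod ((tU i m).1 + (tU i m).2.1 + (tU i m).2.2) i
            - (tU i m).2.1 - (tU i m).2.2) - (tU i m).1
          = -(((tU i m).1 + (tU i m).2.1 + (tU i m).2.2)
              - PySem.Int.mod ((tU i m).1 + (tU i m).2.1 + (tU i m).2.2) i) := by ring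
      rw [e]
      exact (dvd_neg).mpr h1
    rw [mod_congr i _ _ hi hd, mod_self_of_InR i _ hi hcan.1]
  show (PySem.Int.mod (PySem.Int.mod ((tU i m).1 + (tU i m).2.1 + (tU i m).2.2) i
      - (tU i m).2.1 - (tU i m).2.2) i, (tU i m).2.1, (tU i m).2.2) = tU i m
  rw [hS]

-- ----- loop B returns false when no multiple exists -----
theorem loopB_false (i : Int) (hi : i ≠ 0) (p0 : Nat)
    (hmin : ∀ k, 1 ≤ k → k < p0 → tU i k ≠ tU i 0) (hnoz : ∀ t, ¬ tZ i t) :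
    ∀ n m, 1 ≤ m → m ≤ p0 → m ≤ n →
      loopB i (PySem.Int.mod 1 i) n (tU i m).1 (tU i m).2.1 (tU i m).2.2 = false := by
  intro n
  induction n with
  | zero => intro m h1 _ h3; omega
  | succ n ih =>
    intro m h1 h2 h3
    obtain ⟨m', rfl⟩ : ∃ m', m = m' + 1 := ⟨m - 1, by omega⟩
    simp only [loopB]
    have hB := tU_back i hi m'
    have hb1 : PySem.Int.mod ((tU i (m' + 1)).2.2 - (tU i (m' + 1)).1 - (tU i (m' + 1)).2.1) i
        = (tU i m').1 := congrArg Prod.fst hB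
    have hb2 : (tU i (m' + 1)).1 = (tU i m').2.1 := congrArg (fun s => s.2.1) hB
    have hb3 : (tU i (m' + 1)).2.1 = (tU i m').2.2 := congrArg (fun s => s.2.2) hB
    rw [if_neg (show ¬ (tU i (m' + 1)).1 = 0 from hnoz (m' + 1)), hB, hb1, hb2, hb3]
    by_cases h0 : m' = 0
    · subst h0
      rw [if_pos (show tU i 0 = (PySem.Int.mod 1 i, PySem.Int.mod 1 i, PySem.Int.mod 1 i)
        from rfl)]
    · rw [if_neg (show ¬ tU i m' = (PySem.Int.mod 1 i, PySem.Int.mod 1 i, PySem.Int.mod 1 i)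
        from hmin m' (by omega) (by omega))]
      exact ih m' (by omega) (by omega) (by omega)

-- ----- loop B returns true when a multiple exists -----
theorem loopB_true (i : Int) (hi : i ≠ 0) (p0 : Nat) (hret : tU i p0 = tU i 0)
    (hmin : ∀ k, 1 ≤ k → k < p0 → tU i k ≠ tU i 0) :
    ∀ n m, 1 ≤ m → m ≤ p0 → m ≤ n →
      ((∃ t, 1 ≤ t ∧ t ≤ m ∧ tZ i t) ∨ (m = p0 ∧ tZ i 0)) →
      loopB i (PySem.Int.mod 1 i) n (tU i m).1 (tU i m).2.1 (tU i m).2.2 = true := by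
  intro n
  induction n with
  | zero => intro m h1 _ h3 _; omega
  | succ n ih =>
    intro m h1 h2 h3 hcase
    obtain ⟨m', rfl⟩ : ∃ m', m = m' + 1 := ⟨m - 1, by omega⟩
    simp only [loopB]
    by_cases hz : (tU i (m' + 1)).1 = 0
    · rw [if_pos hz]
    · rw [if_neg hz]
      obtain ⟨t, ht1, ht2, ht3⟩ : ∃ t, 1 ≤ t ∧ t ≤ m' ∧ tZ i t := by
        rcases hcase with ⟨t, ht1, ht2, ht3⟩ | ⟨hm, h0⟩
        · refine ⟨t, ht1, ?_, ht3⟩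
          rcases Nat.lt_or_ge t (m' + 1) with h | h
          · omega
          · exfalso
            apply hz
            rw [show m' + 1 = t by omega]
            exact ht3
        · exfalso
          apply hz
          show (tU i (m' + 1)).1 = 0
          rw [hm, hret]
          exact h0
      have hB := tU_back i hi m'
      have hb1 : PySem.Int.mod ((tU i (m' + 1)).2.2 - (tU i (m' + 1)).1 - (tU i (m' + 1)).2.1) i
          = (tU i m').1 := congrArg Prod.fst hB
      have hb2 : (tU i (m' + 1)).1 = (tU i m').2.1 := congrArg (fun s => s.2.1) hB
      have hb3 : (tU i (m' + 1)).2.1 = (tU i m').2.2 := congrArg (fun s => s.2.2) hB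
      rw [hB, hb1, hb2, hb3]
      rw [if_neg (show ¬ tU i m' = (PySem.Int.mod 1 i, PySem.Int.mod 1 i, PySem.Int.mod 1 i)
        from hmin m' (by omega) (by omega))]
      exact ih m' (by omega) (by omega) (by omega) (Or.inl ⟨t, ht1, ht2, ht3⟩)

theorem tMain (i : Int) (hi : i ≠ 0) :
    has_tribonacci_multiple i = has_tribonacci_multiple_alt i := by
  obtain ⟨p, hp1, hpN, hper⟩ := exists_period i hi
  have hQ : ∃ m, tU i (m + 1) = tU i 0 := ⟨p - 1, by rw [show p - 1 + 1 = p by omega]; exact hper⟩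
  haveI : DecidablePred (fun m => tU i (m + 1) = tU i 0) := fun m => by infer_instance
  set p0 : Nat := Nat.find hQ + 1 with hp0def
  have hret : tU i p0 = tU i 0 := Nat.find_spec hQ
  have hmin : ∀ k, 1 ≤ k → k < p0 → tU i k ≠ tU i 0 := by
    intro k hk1 hk2 hk3
    exact Nat.find_min hQ (show k - 1 < Nat.find hQ by omega)
      (by rw [show k - 1 + 1 = k by omega]; exact hk3)
  have hp0le : p0 ≤ p := by
    have := Nat.find_min' hQ (show tU i (p - 1 + 1) = tU i 0 by
      rw [show p - 1 + 1 = p by omega]; exact hper)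
    omega
  by_cases hz : ∃ k, tZ i k
  · haveI : DecidablePred (tZ i) := fun k => by unfold tZ; infer_instance
    have hk := Nat.find_spec hz
    have hmin' : ∀ t < Nat.find hz, ¬ tZ i t := fun t ht => Nat.find_min hz ht
    have hkp : Nat.find hz < p := by
      by_contra hge
      push_neg at hge
      have hz2 : tZ i (Nat.find hz - p) := by
        show (tU i (Nat.find hz - p)).1 = 0
        have hsh := tU_periodic i p hper (Nat.find hz - p)
        rw [show p + (Nat.find hz - p) = Nat.find hz by omega] at hsh
        rw [← hsh]
        exact hk
      exact Nat.find_min hz (show Nat.find hz - p < Nat.find hz by omega) hz2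
    have hA : has_tribonacci_multiple i = true :=
      loopA_true i hi _ hk hmin' (i.natAbs ^ 3 + 4) 0 ∅ (by omega) (by omega) (tSeen_empty i)
    have hB : has_tribonacci_multiple_alt i = true := by
      obtain ⟨k, hzk⟩ := hz
      have hzk' : tZ i (k % p0) := by
        show (tU i (k % p0)).1 = 0
        rw [← tU_reduce i p0 (by omega) hret k]
        exact hzk
      have hcase : (∃ t, 1 ≤ t ∧ t ≤ p0 ∧ tZ i t) ∨ (p0 = p0 ∧ tZ i 0) := by
        rcases Nat.eq_zero_or_pos (k % p0) with h | h
        · exact Or.inr ⟨rfl, by rw [← h]; exact hzk'⟩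
        · exact Or.inl ⟨k % p0, h, Nat.le_of_lt (Nat.mod_lt k (by omega)), hzk'⟩
      have hrun := loopB_true i hi p0 hret hmin (i.natAbs ^ 3 + 4) p0
        (by omega) (by omega) (by omega) hcase
      have e1 : (tU i p0).1 = PySem.Int.mod 1 i := congrArg Prod.fst hret
      have e2 : (tU i p0).2.1 = PySem.Int.mod 1 i := congrArg (fun s => s.2.1) hret
      have e3 : (tU i p0).2.2 = PySem.Int.mod 1 i := congrArg (fun s => s.2.2) hret
      rw [e1, e2, e3] at hrun
      exact hrun
    rw [hA, hB]
  · rw [not_exists] at hz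
    have hA : has_tribonacci_multiple i = false :=
      loopA_false i hi p hp1 hper hz (i.natAbs ^ 3 + 4) 0 ∅ (by omega) (by omega) (tSeen_empty i)
    have hB : has_tribonacci_multiple_alt i = false := by
      have hrun := loopB_false i hi p0 hmin hz (i.natAbs ^ 3 + 4) p0
        (by omega) (by omega) (by omega)
      have e1 : (tU i p0).1 = PySem.Int.mod 1 i := congrArg Prod.fst hret
      have e2 : (tU i p0).2.1 = PySem.Int.mod 1 i := congrArg (fun s => s.2.1) hret
      have e3 : (tU i p0).2.2 = PySem.Int.mod 1 i := congrArg (fun s => s.2.2) hret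
      rw [e1, e2, e3] at hrun
      exact hrun
    rw [hA, hB]

-- ===== VERDICT (by name: the statement is the Claim_ definition above) =====
theorem has_tribonacci_multiple_spec : Claim_equal_has_tribonacci_multiple := by
  intro i _ hpre
  unfold Spec_has_tribonacci_multiple
  exact tMain i hpre
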